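-- pv_equiv track=rewrite | github.com/mehrdadkh73/CS-111-Python | Xiaofan_Wu_ps09_programs/Titanic/titanic.py | helperfunction
-- ===== SOURCE A (Python) =====
-- def getKey(s):
--     #split the word at the equal sign
--     word=s.split('=')
--     #get the word to the left
--     leftWord=word[0]
--     #clean the spaces around
--     leftWord.strip()
--     return leftWord
--
-- def getValue(s):
--     word=s.split('=')
--     #get the word to the right
--     rightWord=word[1]
--      #clean the spaces around
--     rightWord.strip()
--     return rightWord
--
-- def helperfunction(line):
--     #create an empty dictionary
--
--     dictionaryOfPassenger={}
--     #split the dictionary at ;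
--     listofwords=line.strip().split(';')
--     #for each of the word afte split at ; in one dictionary. Check if victim
--     #is in the word, if it is, create a new dictionary named 'name' and 'status'
--     #and add the values by splitting the word at the "("
--     for eachword in listofwords:
--
--         if 'victim' in eachword:
--
--             dictionaryOfPassenger['name']=eachword[:eachword.find('(victim)')]
--             dictionaryOfPassenger['status']='victim'
--             #loop through the index in case there are passengers that do not
--             #have one of the keys.
--             for i in range(1,len(listofwords)):
--                 dictionaryOfPassenger[getKey(listofwords[i].strip())]=getValue(listofwords[i])
--         #If the word survivor in the word, do the same thing as previously
--         #except this time the values will be survivor for status.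
--         elif 'survivor' in eachword:
--             dictionaryOfPassenger['name']=eachword[:eachword.find('(survivor)')]
--             dictionaryOfPassenger['status']='survivor'
--             #loop through the index in case there are passengers that do not
--             #have one of the keys.
--             for i in range(1,len(listofwords)):
--                 dictionaryOfPassenger[getKey(listofwords[i].strip())]=getValue(listofwords[i])
--
--     return dictionaryOfPassenger
-- ===== SOURCE B (Python) =====
-- def helperfunction(line):
--     # Pass 1: find the last marker word, recording name and status.
--     words = line.strip().split(';')
--     name = status = None
--     for w in words:
--         if 'victim' in w:
--             name, status = w[:w.find('(victim)')], 'victim'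
--         elif 'survivor' in w:
--             name, status = w[:w.find('(survivor)')], 'survivor'
--     if status is None:
--         return {}
--     # Pass 2: one key=value pass over the remaining words.
--     d = {'name': name, 'status': status}
--     for w in words[1:]:
--         d[w.strip().split('=')[0]] = w.split('=')[1]
--     return d
-- ===== Notes on version B (the rewrite author's own statement) =====
-- stated objective: simpler
-- what changed: A runs the full key=value indexing loop once per marker word inside the marker scan (nested loops, repeated dict passes, helpers getKey/getValue); B does two sequential single passes: one scan recording the last marker's name/status, then, only if a marker was found, one key=value pass over words[1:].
import Mathlib
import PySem

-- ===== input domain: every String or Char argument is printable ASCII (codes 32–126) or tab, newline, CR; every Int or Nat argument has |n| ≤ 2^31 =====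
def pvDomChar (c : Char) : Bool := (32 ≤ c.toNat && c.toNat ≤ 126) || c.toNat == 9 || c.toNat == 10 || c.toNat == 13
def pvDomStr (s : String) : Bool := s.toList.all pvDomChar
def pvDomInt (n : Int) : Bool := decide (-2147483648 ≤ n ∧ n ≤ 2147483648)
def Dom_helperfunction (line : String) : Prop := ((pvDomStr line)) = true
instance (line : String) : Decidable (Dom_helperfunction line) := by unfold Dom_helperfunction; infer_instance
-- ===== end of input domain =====

-- B replaces A's nested loops (full key=value pass re-run for every marker word) by two
-- sequential single passes: find the last marker, then one key=value pass (objective: simpler).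

-- ===== PORT A =====
-- s.split('=')[0]; split with a non-empty separator never returns none and never an empty list
def getKey (s : String) : String :=
  PySem.List.pyGetD ((PySem.Str.split? s "=").getD []) 0 ""

-- s.split('=')[1]; IndexError when '=' is absent — those inputs are excluded by Pre_
def getValue (s : String) : String :=
  PySem.List.pyGetD ((PySem.Str.split? s "=").getD []) 1 ""

def helperfunction (line : String) : List (String × String) :=
  let listofwords := (PySem.Str.split? (PySem.Str.strip line) ";").getD []
  (listofwords.foldl (fun d eachword =>
      if PySem.Str.isIn "victim" eachword then
        let d := d.insert "name"
          (PySem.Str.slice eachword none (some (PySem.Str.find eachword "(victim)")))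
        let d := d.insert "status" "victim"
        (PySem.List.pyRange 1 (PySem.List.len listofwords)).foldl
          (fun d i =>
            d.insert (getKey (PySem.Str.strip (PySem.List.pyGetD listofwords i "")))
                     (getValue (PySem.List.pyGetD listofwords i ""))) d
      else if PySem.Str.isIn "survivor" eachword then
        let d := d.insert "name"
          (PySem.Str.slice eachword none (some (PySem.Str.find eachword "(survivor)")))
        let d := d.insert "status" "survivor"
        (PySem.List.pyRange 1 (PySem.List.len listofwords)).foldl
          (fun d i =>
            d.insert (getKey (PySem.Str.strip (PySem.List.pyGetD listofwords i "")))
                     (getValue (PySem.List.pyGetD listofwords i ""))) d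
      else d)
    (PySem.Dict.empty : PySem.Dict String String)).items

-- ===== PORT B =====
def helperfunction_alt (line : String) : List (String × String) :=
  let words := (PySem.Str.split? (PySem.Str.strip line) ";").getD []
  -- pass 1: last marker word wins
  let m : Option (String × String) := words.foldl (fun acc w =>
      if PySem.Str.isIn "victim" w then
        some (PySem.Str.slice w none (some (PySem.Str.find w "(victim)")), "victim")
      else if PySem.Str.isIn "survivor" w then
        some (PySem.Str.slice w none (some (PySem.Str.find w "(survivor)")), "survivor")
      else acc) none
  match m with
  | none => []
  | some (n, s) =>
    -- pass 2: one key=value pass over words[1:]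
    ((words.drop 1).foldl (fun d w =>
        d.insert (PySem.List.pyGetD ((PySem.Str.split? (PySem.Str.strip w) "=").getD []) 0 "")
                 (PySem.List.pyGetD ((PySem.Str.split? w "=").getD []) 1 ""))
      (PySem.Dict.ofList [("name", n), ("status", s)])).items

-- ===== PRECONDITION & SPEC =====
-- Pre_ excludes exactly the inputs where Python A raises IndexError: a marker word is present
-- and some word after the first contains no '=' (getValue's s.split('=')[1] then fails).
def Pre_helperfunction (line : String) : Prop :=
  (∀ w ∈ (PySem.Str.split? (PySem.Str.strip line) ";").getD [],
      PySem.Str.isIn "victim" w = false ∧ PySem.Str.isIn "survivor" w = false) ∨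
  (∀ w ∈ ((PySem.Str.split? (PySem.Str.strip line) ";").getD []).drop 1,
      PySem.Str.isIn "=" w = true)
instance (line : String) : Decidable (Pre_helperfunction line) := by
  unfold Pre_helperfunction; infer_instance

def pvWitness_helperfunction : String := "John Smith(victim); age=30; class=1"

def Spec_helperfunction (line : String) (out : List (String × String)) : Prop :=
  out = helperfunction_alt line
instance (line : String) (out : List (String × String)) : Decidable (Spec_helperfunction line out) := by
  unfold Spec_helperfunction; infer_instance

-- ===== CLAIM (what is proved, stated in full; the proofs are below) =====
def Claim_equal_helperfunction : Prop :=
  ∀ (line : String), Dom_helperfunction line → Pre_helperfunction line →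
    Spec_helperfunction line (helperfunction line)

-- ===== LEMMAS AND PROOFS =====

-- abbreviations for the proof: sequences of dict inserts
def pvIns (d : PySem.Dict String String) (p : String × String) : PySem.Dict String String :=
  d.insert p.1 p.2

def pvApply (d : PySem.Dict String String) (ps : List (String × String)) : PySem.Dict String String :=
  ps.foldl pvIns d

-- the key=value pairs a full inner pass inserts (fixed by the word list)
def pvKV (ws : List String) : List (String × String) :=
  (ws.drop 1).map (fun w => (getKey (PySem.Str.strip w), getValue w))

-- marker information of one word
def pvMark (w : String) : Option (String × String) :=
  if PySem.Str.isIn "victim" w then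
    some (PySem.Str.slice w none (some (PySem.Str.find w "(victim)")), "victim")
  else if PySem.Str.isIn "survivor" w then
    some (PySem.Str.slice w none (some (PySem.Str.find w "(survivor)")), "survivor")
  else none

-- everything A inserts while processing one word
def pvBlock (ws : List String) (w : String) : List (String × String) :=
  match pvMark w with
  | some p => ("name", p.1) :: ("status", p.2) :: pvKV ws
  | none => []

-- "keep the last some" fold step
def pvKeep {α β : Type} (g : α → Option β) (a : Option β) (x : α) : Option β :=
  match g x with
  | some p => some p
  | none => a

-- "last some wins" combination
def pvOr {β : Type} (o a : Option β) : Option β :=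
  match o with
  | some p => some p
  | none => a

theorem pvKeep_acc {α β : Type} (g : α → Option β) (t : List α) :
    ∀ acc : Option β, t.foldl (pvKeep g) acc = pvOr (t.foldl (pvKeep g) none) acc := by
  induction t with
  | nil => intro acc; rfl
  | cons w t ih =>
      intro acc
      simp only [List.foldl_cons]
      rw [ih (pvKeep g acc w), ih (pvKeep g none w)]
      rcases h : t.foldl (pvKeep g) none with _ | p
      · cases hg : g w <;> simp [pvOr, pvKeep, hg]
      · simp [pvOr]

-- last value written to key k by a sequence of inserts
def pvLast (ps : List (String × String)) (k : String) : Option String :=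
  ps.foldl (pvKeep (fun p => if p.1 = k then some p.2 else none)) none

theorem pvLast_cons (p : String × String) (t : List (String × String)) (k : String) :
    pvLast (p :: t) k = pvOr (pvLast t k) (if p.1 = k then some p.2 else none) := by
  unfold pvLast
  simp only [List.foldl_cons]
  rw [pvKeep_acc]
  rcases h : t.foldl (pvKeep (fun p => if p.1 = k then some p.2 else none)) none with _ | v
  · by_cases hk : p.1 = k <;> simp [pvOr, pvKeep, hk, h]
  · simp [pvOr, h]

theorem pvLast_eq_none_iff (ps : List (String × String)) (k : String) :
    pvLast ps k = none ↔ ∀ p ∈ ps, p.1 ≠ k := by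
  induction ps with
  | nil => simp [pvLast]
  | cons p t ih =>
      rw [pvLast_cons]
      rcases h : pvLast t k with _ | v
      · simp only [pvOr]
        constructor
        · intro hnone q hq
          rcases List.mem_cons.mp hq with rfl | hq
          · intro hk; rw [if_pos hk] at hnone; exact absurd hnone (by simp)
          · exact (ih.mp h) q hq
        · intro hall
          rw [if_neg (hall p (List.mem_cons_self ..))]
      · simp only [pvOr]
        constructor
        · intro hnone; exact absurd hnone (by simp)
        · intro hall
          exfalso
          have hn : pvLast t k = none :=
            ih.mpr (fun q hq => hall q (List.mem_cons.mpr (Or.inr hq)))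
          rw [hn] at h; exact absurd h (by simp)

theorem getD_pvApply (ps : List (String × String)) :
    ∀ (d : PySem.Dict String String) (k : String),
      (pvApply d ps).getD k "" =
        match pvLast ps k with
        | some v => v
        | none => d.getD k "" := by
  induction ps with
  | nil => intro d k; rfl
  | cons p t ih =>
      intro d k
      have hstep : pvApply d (p :: t) = pvApply (d.insert p.1 p.2) t := rfl
      rw [hstep, ih, pvLast_cons]
      rcases h : pvLast t k with _ | v
      · simp only [pvOr]
        rw [PySem.Dict.getD_insert]
        by_cases hk : k = p.1
        · simp [hk]
        · have hne : p.1 ≠ k := fun hE => hk hE.symm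
          simp [hk, hne]
      · rfl

-- keys and nodup of an insert pass, as instances of the PySem fold lemmas
theorem keys_pvApply (ps : List (String × String)) (d : PySem.Dict String String) :
    (pvApply d ps).keys = PySem.Set.update d.keys (ps.map Prod.fst) :=
  PySem.Dict.keys_foldl_insert_key ps Prod.fst (fun _ p => p.2) d

theorem nodup_keys_pvApply (ps : List (String × String)) (d : PySem.Dict String String)
    (h : d.keys.Nodup) : (pvApply d ps).keys.Nodup :=
  PySem.Dict.nodup_keys_foldl_insert_key ps Prod.fst (fun _ p => p.2) d h

theorem set_update_of_subset {s : PySem.Set String} :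
    ∀ {l : List String}, (∀ x ∈ l, x ∈ s) → s.update l = s := by
  intro l
  induction l generalizing s with
  | nil => intro _; rfl
  | cons x t ih =>
      intro h
      have hx : s.add x = s := PySem.Set.add_of_mem (h x (by simp))
      show (s.add x).update t = s
      rw [hx]
      exact ih (fun y hy => h y (by simp [hy]))

theorem set_update_update (s : PySem.Set String) (l : List String) :
    PySem.Set.update (PySem.Set.update s l) l = PySem.Set.update s l :=
  set_update_of_subset (fun x hx => (PySem.Set.mem_update s l x).mpr (Or.inr hx))

-- the heart: a later insert pass with the same key sequence overrides an earlier one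
theorem pvApply_override (xs ys : List (String × String)) (d : PySem.Dict String String)
    (hd : d.keys.Nodup) (h : xs.map Prod.fst = ys.map Prod.fst) :
    pvApply (pvApply d xs) ys = pvApply d ys := by
  have hnd1 : (pvApply (pvApply d xs) ys).keys.Nodup :=
    nodup_keys_pvApply _ _ (nodup_keys_pvApply _ _ hd)
  have hnd2 : (pvApply d ys).keys.Nodup := nodup_keys_pvApply _ _ hd
  have hkeys : (pvApply (pvApply d xs) ys).keys = (pvApply d ys).keys := by
    rw [keys_pvApply, keys_pvApply, keys_pvApply, h, set_update_update]
  have hgetD : ∀ k, (pvApply (pvApply d xs) ys).getD k "" = (pvApply d ys).getD k "" := by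
    intro k
    rw [getD_pvApply ys (pvApply d xs) k, getD_pvApply ys d k]
    rcases hy : pvLast ys k with _ | v
    · have hky : ∀ p ∈ ys, p.1 ≠ k := (pvLast_eq_none_iff ys k).mp hy
      have hkx : pvLast xs k = none := by
        rw [pvLast_eq_none_iff]
        intro p hp hpk
        have hk1 : k ∈ List.map Prod.fst xs := List.mem_map.mpr ⟨p, hp, hpk⟩
        rw [h] at hk1
        rcases List.mem_map.mp hk1 with ⟨q, hq, hqk⟩
        exact hky q hq hqk
      rw [getD_pvApply xs d k, hkx]
    · rfl
  apply PySem.Dict.ext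
  rw [PySem.Dict.items_eq_map_keys _ hnd1 "", PySem.Dict.items_eq_map_keys _ hnd2 "", hkeys]
  exact List.map_congr_left (fun k _ => by rw [hgetD k])

-- pass-1 fold step of B, in pvMark form
def pvStepB : Option (String × String) → String → Option (String × String) :=
  pvKeep pvMark

-- the main collapse: A's fold of whole blocks equals "apply only the last marker's block"
theorem pvG (ws : List String) (t : List String) :
    ∀ (d : PySem.Dict String String), d.keys.Nodup →
      t.foldl (fun d w => pvApply d (pvBlock ws w)) d =
        match t.foldl pvStepB none with
        | none => d
        | some p => pvApply d (("name", p.1) :: ("status", p.2) :: pvKV ws) := by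
  induction t with
  | nil => intro d _; rfl
  | cons w t ih =>
      intro d hd
      simp only [List.foldl_cons]
      have hnd : (pvApply d (pvBlock ws w)).keys.Nodup := nodup_keys_pvApply _ _ hd
      rw [ih _ hnd]
      have hacc : t.foldl pvStepB (pvStepB none w) = pvOr (t.foldl pvStepB none) (pvStepB none w) := by
        unfold pvStepB
        exact pvKeep_acc pvMark t (pvKeep pvMark none w)
      rw [hacc]
      rcases hm : pvMark w with _ | q
      · have hb : pvBlock ws w = [] := by simp [pvBlock, hm]
        have hs : pvStepB none w = none := by simp [pvStepB, pvKeep, hm]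
        rw [hb, hs]
        rcases t.foldl pvStepB none with _ | p <;> rfl
      · have hb : pvBlock ws w = ("name", q.1) :: ("status", q.2) :: pvKV ws := by
          simp [pvBlock, hm]
        have hs : pvStepB none w = some q := by simp [pvStepB, pvKeep, hm]
        rw [hb, hs]
        rcases t.foldl pvStepB none with _ | p
        · rfl
        · exact pvApply_override _ _ d hd (by simp)

-- A's per-word body is "apply the word's whole block"
theorem stepA_eq (ws : List String) (d : PySem.Dict String String) (w : String) :
    (if PySem.Str.isIn "victim" w then
        (PySem.List.pyRange 1 (PySem.List.len ws)).foldl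
          (fun d i =>
            d.insert (getKey (PySem.Str.strip (PySem.List.pyGetD ws i "")))
                     (getValue (PySem.List.pyGetD ws i "")))
          ((d.insert "name"
              (PySem.Str.slice w none (some (PySem.Str.find w "(victim)")))).insert "status" "victim")
      else if PySem.Str.isIn "survivor" w then
        (PySem.List.pyRange 1 (PySem.List.len ws)).foldl
          (fun d i =>
            d.insert (getKey (PySem.Str.strip (PySem.List.pyGetD ws i "")))
                     (getValue (PySem.List.pyGetD ws i "")))
          ((d.insert "name"
              (PySem.Str.slice w none (some (PySem.Str.find w "(survivor)")))).insert "status" "survivor")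
      else d)
    = pvApply d (pvBlock ws w) := by
  have hinner : ∀ d0 : PySem.Dict String String,
      (PySem.List.pyRange 1 (PySem.List.len ws)).foldl
        (fun d i =>
          d.insert (getKey (PySem.Str.strip (PySem.List.pyGetD ws i "")))
                   (getValue (PySem.List.pyGetD ws i ""))) d0
      = pvApply d0 (pvKV ws) := by
    intro d0
    rw [PySem.List.foldl_pyRange_pyGetD ws ""
        (fun d w => d.insert (getKey (PySem.Str.strip w)) (getValue w)) d0 (by norm_num)]
    unfold pvApply pvKV
    rw [List.foldl_map]
    simp only [Int.toNat_one, pvIns]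
  by_cases hv : PySem.Str.isIn "victim" w
  · rw [if_pos hv, hinner]
    unfold pvBlock pvMark
    rw [if_pos hv]
    rfl
  · rw [if_neg hv]
    by_cases hs : PySem.Str.isIn "survivor" w
    · rw [if_pos hs, hinner]
      unfold pvBlock pvMark
      rw [if_neg hv, if_pos hs]
      rfl
    · rw [if_neg hs]
      unfold pvBlock pvMark
      rw [if_neg hv, if_neg hs]
      rfl

-- B's pass-1 body is pvStepB
theorem stepB_eq :
    (fun (acc : Option (String × String)) (w : String) =>
      if PySem.Str.isIn "victim" w then
        some (PySem.Str.slice w none (some (PySem.Str.find w "(victim)")), "victim")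
      else if PySem.Str.isIn "survivor" w then
        some (PySem.Str.slice w none (some (PySem.Str.find w "(survivor)")), "survivor")
      else acc) = pvStepB := by
  funext acc w
  unfold pvStepB pvKeep pvMark
  by_cases hv : PySem.Str.isIn "victim" w
  · rw [if_pos hv, if_pos hv]
  · rw [if_neg hv, if_neg hv]
    by_cases hs : PySem.Str.isIn "survivor" w
    · rw [if_pos hs, if_pos hs]
    · rw [if_neg hs, if_neg hs]

-- B's pass-2 is an insert pass of pvKV
theorem passB_eq (ws : List String) (d0 : PySem.Dict String String) :
    (ws.drop 1).foldl (fun d w =>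
        d.insert (PySem.List.pyGetD ((PySem.Str.split? (PySem.Str.strip w) "=").getD []) 0 "")
                 (PySem.List.pyGetD ((PySem.Str.split? w "=").getD []) 1 ""))
      d0 = pvApply d0 (pvKV ws) := by
  unfold pvApply pvKV
  rw [List.foldl_map]
  simp only [pvIns, getKey, getValue]

-- the two ports, with the shared word list abstracted
theorem pvPorts_eq (ws : List String) :
    (ws.foldl (fun d eachword =>
        if PySem.Str.isIn "victim" eachword then
          (PySem.List.pyRange 1 (PySem.List.len ws)).foldl
            (fun d i =>
              d.insert (getKey (PySem.Str.strip (PySem.List.pyGetD ws i "")))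
                       (getValue (PySem.List.pyGetD ws i "")))
            ((d.insert "name"
                (PySem.Str.slice eachword none
                  (some (PySem.Str.find eachword "(victim)")))).insert "status" "victim")
        else if PySem.Str.isIn "survivor" eachword then
          (PySem.List.pyRange 1 (PySem.List.len ws)).foldl
            (fun d i =>
              d.insert (getKey (PySem.Str.strip (PySem.List.pyGetD ws i "")))
                       (getValue (PySem.List.pyGetD ws i "")))
            ((d.insert "name"
                (PySem.Str.slice eachword none
                  (some (PySem.Str.find eachword "(survivor)")))).insert "status" "survivor")
        else d)
      (PySem.Dict.empty : PySem.Dict String String)).items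
    = match ws.foldl (fun acc w =>
          if PySem.Str.isIn "victim" w then
            some (PySem.Str.slice w none (some (PySem.Str.find w "(victim)")), "victim")
          else if PySem.Str.isIn "survivor" w then
            some (PySem.Str.slice w none (some (PySem.Str.find w "(survivor)")), "survivor")
          else acc) none with
      | none => []
      | some (n, s) =>
        ((ws.drop 1).foldl (fun d w =>
            d.insert (PySem.List.pyGetD ((PySem.Str.split? (PySem.Str.strip w) "=").getD []) 0 "")
                     (PySem.List.pyGetD ((PySem.Str.split? w "=").getD []) 1 ""))
          (PySem.Dict.ofList [("name", n), ("status", s)])).items := by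
  rw [stepB_eq]
  have hbody : (fun (d : PySem.Dict String String) (eachword : String) =>
      if PySem.Str.isIn "victim" eachword then
        (PySem.List.pyRange 1 (PySem.List.len ws)).foldl
          (fun d i =>
            d.insert (getKey (PySem.Str.strip (PySem.List.pyGetD ws i "")))
                     (getValue (PySem.List.pyGetD ws i "")))
          ((d.insert "name"
              (PySem.Str.slice eachword none
                (some (PySem.Str.find eachword "(victim)")))).insert "status" "victim")
      else if PySem.Str.isIn "survivor" eachword then
        (PySem.List.pyRange 1 (PySem.List.len ws)).foldl
          (fun d i =>
            d.insert (getKey (PySem.Str.strip (PySem.List.pyGetD ws i "")))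
                     (getValue (PySem.List.pyGetD ws i "")))
          ((d.insert "name"
              (PySem.Str.slice eachword none
                (some (PySem.Str.find eachword "(survivor)")))).insert "status" "survivor")
      else d) = fun d w => pvApply d (pvBlock ws w) := by
    funext d w
    exact stepA_eq ws d w
  rw [hbody, pvG ws ws PySem.Dict.empty PySem.Dict.nodup_keys_empty]
  rcases hf : ws.foldl pvStepB none with _ | p
  · rfl
  · rcases p with ⟨n, s⟩
    show (pvApply PySem.Dict.empty (("name", n) :: ("status", s) :: pvKV ws)).items
      = ((ws.drop 1).foldl (fun d w =>
          d.insert (PySem.List.pyGetD ((PySem.Str.split? (PySem.Str.strip w) "=").getD []) 0 "")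
                   (PySem.List.pyGetD ((PySem.Str.split? w "=").getD []) 1 ""))
        (PySem.Dict.ofList [("name", n), ("status", s)])).items
    rw [passB_eq]
    rfl

-- ===== VERDICT (by name: the statement is the Claim_ definition above) =====
theorem helperfunction_spec : Claim_equal_helperfunction := by
  intro line _ _
  unfold Spec_helperfunction helperfunction helperfunction_alt
  exact pvPorts_eq ((PySem.Str.split? (PySem.Str.strip line) ";").getD [])
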